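-- pv_equiv track=rewrite | github.com/GoosK67/Reusable | scripts/xml_to_docx.py | _extract_snippet_for_signals
-- ===== SOURCE A (Python) =====
-- def _extract_snippet_for_signals(text, signals):
--     lowered = text.lower()
--     first_idx = -1
--     used_signal = ""
--     for signal in signals:
--         idx = lowered.find(signal)
--         if idx >= 0 and (first_idx < 0 or idx < first_idx):
--             first_idx = idx
--             used_signal = signal
--
--     if first_idx < 0:
--         return ""
--
--     start = max(0, first_idx - 180)
--     end = min(len(text), first_idx + 420)
--     snippet = text[start:end].strip()
--     if start > 0:
--         snippet = "..." + snippet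
--     if end < len(text):
--         snippet = snippet + "..."
--     return f"({used_signal}) {snippet}"
-- ===== SOURCE B (Python) =====
-- def _extract_snippet_for_signals(text, signals):
--     lowered = text.lower()
--     for pos in range(len(lowered) + 1):
--         hit = next((s for s in signals if lowered.startswith(s, pos)), None)
--         if hit is not None:
--             start = max(0, pos - 180)
--             end = min(len(text), pos + 420)
--             snippet = text[start:end].strip()
--             if start > 0:
--                 snippet = "..." + snippet
--             if end < len(text):
--                 snippet = snippet + "..."
--             return f"({hit}) {snippet}"
--     return ""
-- ===== Notes on version B (the rewrite author's own statement) =====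
-- stated objective: alternative
-- what changed: A scans signal-by-signal, computing lowered.find(signal) over the whole text for each signal and keeping the argmin with first-wins tie-break; B scans text positions left-to-right once and returns at the first position where any signal matches (first such signal in list order), with identical windowing/rendering.
import Mathlib
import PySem

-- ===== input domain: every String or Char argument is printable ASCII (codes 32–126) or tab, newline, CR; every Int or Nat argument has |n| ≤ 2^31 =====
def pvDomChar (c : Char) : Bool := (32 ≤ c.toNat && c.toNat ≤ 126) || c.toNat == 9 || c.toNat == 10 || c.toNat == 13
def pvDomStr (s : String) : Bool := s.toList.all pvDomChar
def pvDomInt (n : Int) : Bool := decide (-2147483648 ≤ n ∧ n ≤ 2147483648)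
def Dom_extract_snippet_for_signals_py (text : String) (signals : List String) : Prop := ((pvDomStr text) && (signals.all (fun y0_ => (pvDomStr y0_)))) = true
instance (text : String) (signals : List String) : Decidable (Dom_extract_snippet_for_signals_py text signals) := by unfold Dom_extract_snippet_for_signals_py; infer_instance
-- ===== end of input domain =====

-- B scans text positions left-to-right and stops at the first position where any signal matches
-- (position-major instead of A's signal-major scan with argmin); same output, alternative structure.


-- ===== PORT A =====
-- A: for each signal (in list order) take lowered.find(signal); keep the strictly smallest
-- non-negative index (first achiever wins ties), then render a ±(180/420) window around it.
def extract_snippet_for_signals_py (text : String) (signals : List String) : String :=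
  let lowered := PySem.Str.lower text
  let r : Int × String := signals.foldl (fun acc signal =>
      let idx := PySem.Str.find lowered signal
      if idx ≥ 0 ∧ (acc.1 < 0 ∨ idx < acc.1) then (idx, signal) else acc) (-1, "")
  if r.1 < 0 then ""
  else
    let start : Int := max 0 (r.1 - 180)
    let stop : Int := min (PySem.Str.len text) (r.1 + 420)
    let snippet := PySem.Str.strip (PySem.Str.slice text (some start) (some stop))
    let snippet := if start > 0 then "..." ++ snippet else snippet
    let snippet := if stop < PySem.Str.len text then snippet ++ "..." else snippet
    "(" ++ r.2 ++ ") " ++ snippet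

-- ===== PORT B =====
-- B's loop `for pos in range(len(lowered)+1)` with `lowered.startswith(s, pos)`:
-- structural recursion on the suffix lowered[pos:], carrying pos.
def pvScan (signals : List String) : Nat → List Char → Option (Nat × String)
  | pos, suf =>
    match signals.find? (fun s => PySem.Chars.startswith suf s.toList) with
    | some s => some (pos, s)
    | none =>
      match suf with
      | [] => none
      | _ :: t => pvScan signals (pos + 1) t

def extract_snippet_for_signals_py_alt (text : String) (signals : List String) : String :=
  let lowered := PySem.Str.lower text
  match pvScan signals 0 lowered.toList with
  | none => ""
  | some (pos, hit) =>
    let start : Int := max 0 ((pos : Int) - 180)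
    let stop : Int := min (PySem.Str.len text) ((pos : Int) + 420)
    let snippet := PySem.Str.strip (PySem.Str.slice text (some start) (some stop))
    let snippet := if start > 0 then "..." ++ snippet else snippet
    let snippet := if stop < PySem.Str.len text then snippet ++ "..." else snippet
    "(" ++ hit ++ ") " ++ snippet

-- ===== PRECONDITION & SPEC =====
def Spec_extract_snippet_for_signals_py (text : String) (signals : List String) (out : String) : Prop := out = extract_snippet_for_signals_py_alt text signals
instance (text : String) (signals : List String) (out : String) : Decidable (Spec_extract_snippet_for_signals_py text signals out) := by unfold Spec_extract_snippet_for_signals_py; infer_instance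

-- ===== CLAIM (what is proved, stated in full; the proofs are below) =====
def Claim_equal_extract_snippet_for_signals_py : Prop := ∀ (text : String) (signals : List String), Dom_extract_snippet_for_signals_py text signals → Spec_extract_snippet_for_signals_py text signals (extract_snippet_for_signals_py text signals)

-- ===== LEMMAS AND PROOFS =====

-- abbreviation used only in the proofs: the A-side fold step over lowered L
def pvStep (L : List Char) (acc : Int × String) (signal : String) : Int × String :=
  let idx := PySem.Chars.find L signal.toList
  if idx ≥ 0 ∧ (acc.1 < 0 ∨ idx < acc.1) then (idx, signal) else acc

-- the fold never updates when every signal's find is -1 or at/above a non-negative acc.1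
lemma pvFold_frozen (L : List Char) (sigs : List String) (fi : Int) (us : String)
    (h : ∀ t ∈ sigs, PySem.Chars.find L t.toList = -1 ∨ (0 ≤ fi ∧ fi ≤ PySem.Chars.find L t.toList)) :
    sigs.foldl (pvStep L) (fi, us) = (fi, us) := by
  induction sigs with
  | nil => rfl
  | cons s rest ih =>
    have hs := h s (by simp)
    have hstep : pvStep L (fi, us) s = (fi, us) := by
      unfold pvStep
      rcases hs with h1 | ⟨h1, h2⟩ <;> simp <;> intro hge <;> omega
    simpa [List.foldl_cons, hstep] using ih (fun t ht => h t (by simp [ht]))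

-- if every signal's find is -1 or > p, the fold's first component stays -1 or > p
lemma pvFold_gt (L : List Char) (p : Int) (sigs : List String) (fi : Int) (us : String)
    (hacc : fi = -1 ∨ p < fi)
    (h : ∀ t ∈ sigs, PySem.Chars.find L t.toList = -1 ∨ p < PySem.Chars.find L t.toList) :
    (sigs.foldl (pvStep L) (fi, us)).1 = -1 ∨ p < (sigs.foldl (pvStep L) (fi, us)).1 := by
  induction sigs generalizing fi us with
  | nil => simpa using hacc
  | cons s rest ih =>
    have hs := h s (by simp)
    rw [List.foldl_cons]
    rcases hstep : pvStep L (fi, us) s with ⟨fi', us'⟩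
    have : fi' = -1 ∨ p < fi' := by
      simp only [pvStep] at hstep
      split at hstep
      · rcases hs with h1 | h1 <;> [omega; skip]
        · cases hstep; right; simpa using h1
      · cases hstep; exact hacc
    exact ih fi' us' this (fun t ht => h t (by simp [ht]))

-- pvScan = none means no signal matches at any position ≥ pos
lemma pvScan_none (signals : List String) (L : List Char) (pos : Nat)
    (h : pvScan signals pos (L.drop pos) = none) :
    ∀ q, pos ≤ q → ∀ t ∈ signals, ¬ t.toList <+: L.drop q := by
  generalize hsuf : L.drop pos = suf at h
  induction suf generalizing pos with
  | nil =>
    unfold pvScan at h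
    rcases hfind : signals.find? (fun s => PySem.Chars.startswith [] s.toList) with _ | s
    · intro q hq t ht
      have hdq : L.drop q = [] := by
        have := List.drop_eq_nil_iff.mp hsuf
        exact List.drop_eq_nil_iff.mpr (le_trans this hq)
      rw [hdq]
      have := List.find?_eq_none.mp hfind t ht
      simpa [PySem.Chars.startswith_iff] using this
    · simp [hfind] at h
  | cons c tl ih =>
    unfold pvScan at h
    rcases hfind : signals.find? (fun s => PySem.Chars.startswith (c :: tl) s.toList) with _ | s
    · rw [hfind] at h
      intro q hq t ht
      rcases Nat.eq_or_lt_of_le hq with rfl | hlt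
      · rw [hsuf]
        have := List.find?_eq_none.mp hfind t ht
        simpa [PySem.Chars.startswith_iff] using this
      · have htl : L.drop (pos + 1) = tl := by
          rw [← List.drop_drop]
          simp [hsuf]
        exact ih (pos + 1) htl h q hlt t ht
    · simp [hfind] at h

-- pvScan = some (p, s): p ≥ pos, s is the first signal matching at p, and nothing matches in [pos, p)
lemma pvScan_some (signals : List String) (L : List Char) (pos : Nat) (p : Nat) (s : String)
    (h : pvScan signals pos (L.drop pos) = some (p, s)) :
    pos ≤ p ∧ signals.find? (fun t => PySem.Chars.startswith (L.drop p) t.toList) = some s ∧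
      ∀ q, pos ≤ q → q < p → ∀ t ∈ signals, ¬ t.toList <+: L.drop q := by
  generalize hsuf : L.drop pos = suf at h
  induction suf generalizing pos with
  | nil =>
    unfold pvScan at h
    rcases hfind : signals.find? (fun t => PySem.Chars.startswith [] t.toList) with _ | s'
    · simp [hfind] at h
    · rw [hfind] at h
      have h' : (some (pos, s') : Option (Nat × String)) = some (p, s) := h
      injection h' with h'; injection h' with h1 h2
      subst h1; subst h2
      exact ⟨le_refl _, by rw [hsuf]; exact hfind, fun q hq hlt _ _ => absurd (lt_of_le_of_lt hq hlt) (lt_irrefl _)⟩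
  | cons c tl ih =>
    unfold pvScan at h
    rcases hfind : signals.find? (fun t => PySem.Chars.startswith (c :: tl) t.toList) with _ | s'
    · rw [hfind] at h
      have htl : L.drop (pos + 1) = tl := by
        rw [← List.drop_drop]; simp [hsuf]
      obtain ⟨h1, h2, h3⟩ := ih (pos + 1) htl h
      refine ⟨by omega, h2, fun q hq hlt t ht => ?_⟩
      rcases Nat.eq_or_lt_of_le hq with rfl | hgt
      · rw [hsuf]
        have := List.find?_eq_none.mp hfind t ht
        simpa [PySem.Chars.startswith_iff] using this
      · exact h3 q hgt hlt t ht
    · rw [hfind] at h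
      have h' : (some (pos, s') : Option (Nat × String)) = some (p, s) := h
      injection h' with h'; injection h' with h1 h2
      subst h1; subst h2
      exact ⟨le_refl _, by rw [hsuf]; exact hfind, fun q hq hlt _ _ => absurd (lt_of_le_of_lt hq hlt) (lt_irrefl _)⟩

-- core: the A-side fold equals the rendering of pvScan's result
lemma pvFold_eq_scan (L : List Char) (signals : List String) :
    signals.foldl (pvStep L) (-1, "") =
      (match pvScan signals 0 L with
       | none => ((-1 : Int), "")
       | some (p, s) => ((p : Int), s)) := by
  rcases hscan : pvScan signals 0 L with _ | ⟨p, s⟩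
  · -- no match anywhere: every find is -1
    have hnone := pvScan_none signals L 0 (by simpa using hscan)
    have hall : ∀ t ∈ signals, PySem.Chars.find L t.toList = -1 := by
      intro t ht
      rw [PySem.Chars.find_eq_neg_one_iff]
      intro hinf
      obtain ⟨j, hj⟩ := (PySem.Chars.exists_prefix_drop_iff_isIn t.toList L).mpr
        ((PySem.Chars.isIn_iff_infix t.toList L).mpr hinf)
      exact hnone j (Nat.zero_le _) t ht hj
    exact pvFold_frozen L signals (-1) "" (fun t ht => Or.inl (hall t ht))
  · obtain ⟨-, hfind, hbefore⟩ := pvScan_some signals L 0 p s (by simpa using hscan)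
    have hbefore' : ∀ q, q < p → ∀ t ∈ signals, ¬ t.toList <+: L.drop q :=
      fun q hq => hbefore q (Nat.zero_le _) hq
    -- each signal's find is -1 or ≥ p; signals before s additionally ≠ p
    have hge : ∀ t ∈ signals, PySem.Chars.find L t.toList = -1 ∨
        ((p : Int) ≤ PySem.Chars.find L t.toList) := by
      intro t ht
      rcases eq_or_ne (PySem.Chars.find L t.toList) (-1) with he | hne
      · exact Or.inl he
      · right
        have hnn : 0 ≤ PySem.Chars.find L t.toList := by
          have := PySem.Chars.neg_one_le_find L t.toList; omega
        have hsp := PySem.Chars.find_spec hnn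
        by_contra hlt
        push Not at hlt
        have : (PySem.Chars.find L t.toList).toNat < p := by omega
        exact hbefore' _ this t ht hsp.1
    -- a signal matching at p has find = p
    have hmatch_eq : ∀ t ∈ signals, t.toList <+: L.drop p → PySem.Chars.find L t.toList = (p : Int) := by
      intro t ht hm
      have hnn : 0 ≤ PySem.Chars.find L t.toList := by
        rw [PySem.Chars.find_nonneg_iff]
        exact List.IsInfix.trans hm.isInfix (List.drop_suffix p L).isInfix
      have hsp := PySem.Chars.find_spec hnn
      have h1 : (p : Int) ≤ PySem.Chars.find L t.toList := by
        rcases hge t ht with he | he <;> omega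
      have h2 : ¬ (p : Nat) < (PySem.Chars.find L t.toList).toNat := fun hc => hsp.2 p hc hm
      omega
    obtain ⟨hps, pre, post, hsplit, hpre⟩ := List.find?_eq_some_iff_append.mp hfind
    have hs_mem : s ∈ signals := by rw [hsplit]; simp
    have hs_eq : PySem.Chars.find L s.toList = (p : Int) :=
      hmatch_eq s hs_mem ((PySem.Chars.startswith_iff _ _).mp hps)
    rw [hsplit, List.foldl_append, List.foldl_cons]
    -- pre: every element has find = -1 or > p
    have hpre' : ∀ t ∈ pre, PySem.Chars.find L t.toList = -1 ∨ (p : Int) < PySem.Chars.find L t.toList := by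
      intro t ht
      have htm : t ∈ signals := by rw [hsplit]; simp [ht]
      rcases hge t htm with he | he
      · exact Or.inl he
      · right
        rcases lt_or_eq_of_le he with hlt | heq
        · exact hlt
        · exfalso
          have hm : t.toList <+: L.drop p := by
            have hnn : 0 ≤ PySem.Chars.find L t.toList := by omega
            have := (PySem.Chars.find_spec hnn).1
            rw [← heq] at this
            simpa using this
          have hb := (PySem.Chars.startswith_iff (L.drop p) t.toList).mpr hm
          have hf := hpre t ht
          simp [hb] at hf
    have hpre_res := pvFold_gt L (p : Int) pre (-1) "" (Or.inl rfl) hpre'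
    rcases hres : pre.foldl (pvStep L) (-1, "") with ⟨fi, us⟩
    rw [hres] at hpre_res
    simp only at hpre_res
    have hstep : pvStep L (fi, us) s = ((p : Int), s) := by
      unfold pvStep
      rw [hs_eq]
      have : (0 : Int) ≤ p ∧ (fi < 0 ∨ (p : Int) < fi) := by
        constructor
        · positivity
        · rcases hpre_res with h1 | h1 <;> omega
      simp [this.1, this.2]
    rw [hstep]
    exact pvFold_frozen L post (p : Int) s (fun t ht => by
      rcases hge t (by rw [hsplit]; simp [ht]) with he | he
      · exact Or.inl he
      · exact Or.inr ⟨by positivity, he⟩)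

-- ===== VERDICT (by name: the statement is the Claim_ definition above) =====
theorem extract_snippet_for_signals_py_spec : Claim_equal_extract_snippet_for_signals_py := by
  intro text signals _
  unfold Spec_extract_snippet_for_signals_py
  unfold extract_snippet_for_signals_py extract_snippet_for_signals_py_alt
  simp only []
  have key : signals.foldl
      (fun (acc : Int × String) signal =>
        if PySem.Str.find (PySem.Str.lower text) signal ≥ 0 ∧
            (acc.1 < 0 ∨ PySem.Str.find (PySem.Str.lower text) signal < acc.1)
        then (PySem.Str.find (PySem.Str.lower text) signal, signal) else acc) ((-1 : Int), "") =
      (match pvScan signals 0 (PySem.Str.lower text).toList with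
       | none => ((-1 : Int), "")
       | some (p, s) => ((p : Int), s)) := by
    rw [← pvFold_eq_scan]
    exact PySem.List.foldl_congr_mem signals _ _ _
      (fun acc t _ => by simp [pvStep, PySem.Str.find_eq])
  rw [key]
  rcases hscan : pvScan signals 0 (PySem.Str.lower text).toList with _ | ⟨p, s⟩
  · simp
  · have hnn : ¬ ((p : Int) < 0) := Int.not_lt.mpr (by positivity)
    simp [hnn]
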